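-- pv_equiv track=rewrite | github.com/aUsernameThatWasntTaken/chatbotV2 | chatbot.py | generateListPartitions
-- ===== SOURCE A (Python) =====
-- def generateListPartitions(inputList: list[str], n: int):
--     """
--     function that returns a list of all the ways to split a list into n lists.\n
--     I already hate this project.\n
--     I had to rewrite this godforsaken garbage for n != 3\n
--     I hate my life.\n
--     DONOTEDIT
--     TODO: Rename this and the other function to something better.
--     """
--     returnList: list[list[list[str]]] = []
--     for numbersPossibility in generateIntegerPartitions(n,len(inputList)):
--         iterator = iter(inputList)
--         possibility: list[list[str]] = []
--         for number in numbersPossibility: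
--             possibility.append([])
--             for i in range(number):
--                 try:
--                     possibility[-1].append(next(iterator))
--                 except StopIteration:
--                     break
--         returnList.append(possibility)
--     return returnList
--
-- def generateIntegerPartitions(n:int, i:int):
--     """
--     Another weird function using recursiveness to generate all sets of n positive integers (not including 0) that add up to i.\n
--     Fuck my life and the person I have chosen to be.\n
--     DO NOT TOUCH IF NOT BROKEN
--     """
--     returnList: list[list[int]] = []
--     if n == 2:
--         for j in range(1,i):
--             returnList.append([j,i-j])
--     else:
--         for j in range(1,i):
--             for otherNumsPossibility in generateIntegerPartitions(n-1,i-j):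
--                 possibility = [j]
--                 for number in otherNumsPossibility:
--                     possibility.append(number)
--                 returnList.append(possibility)
--     return returnList
-- ===== SOURCE B (Python) =====
-- def generateListPartitions(inputList: list[str], n: int):
--     """DP over elements: each partial partition either starts a new sublist with
--     the current element or appends it to its last sublist; keep those with n parts."""
--     if n < 1:
--         return []
--     partials = [[]]
--     for elem in inputList:
--         nxt = []
--         for p in partials:
--             nxt.append(p + [[elem]])
--             if p:
--                 nxt.append(p[:-1] + [p[-1] + [elem]])
--         partials = nxt
--     return [p for p in partials if len(p) == n]
-- ===== Notes on version B (the rewrite author's own statement) =====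
-- stated objective: alternative
-- what changed: Replaces the recursive integer-composition generator plus element-by-element iterator reconstruction with a single left-to-right DP over the elements, where each partial partition either starts a new sublist with the current element or extends its last sublist, keeping those with exactly n sublists.
-- intended difference: For n == 1 with a nonempty list A returns [] (its recursion bottoms out at n == 2), while B returns [[inputList]], the single way to split a list into one sublist, which is what the docstring ('all the ways to split a list into n lists') intends. — e.g. on generateListPartitions(["a"], 1): A returns [], B returns [[["a"]]]
import Mathlib
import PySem

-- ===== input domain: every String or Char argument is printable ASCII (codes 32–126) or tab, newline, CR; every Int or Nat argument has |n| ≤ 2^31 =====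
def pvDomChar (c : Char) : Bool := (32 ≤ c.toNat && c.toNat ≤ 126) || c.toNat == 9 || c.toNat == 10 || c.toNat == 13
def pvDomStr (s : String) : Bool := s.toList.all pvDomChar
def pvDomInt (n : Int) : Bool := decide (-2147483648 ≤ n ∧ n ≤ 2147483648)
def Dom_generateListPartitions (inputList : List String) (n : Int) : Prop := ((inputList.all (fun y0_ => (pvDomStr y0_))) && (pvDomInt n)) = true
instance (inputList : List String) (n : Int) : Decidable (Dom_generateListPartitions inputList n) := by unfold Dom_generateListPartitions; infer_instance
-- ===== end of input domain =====

-- B replaces A's recursive integer-composition enumeration (plus iterator-based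
-- reconstruction) by a one-pass DP over the elements; B differs intentionally at
-- n == 1 on nonempty input (see D_ below).

-- ===== PORT A =====
-- helper generateIntegerPartitions(n, i); `.attach` is only the termination device
def genIntParts (n : Int) (i : Int) : List (List Int) :=
  if n == 2 then
    (PySem.List.pyRange 1 i 1).map (fun j => [j, i - j])
  else
    (PySem.List.pyRange 1 i 1).attach.flatMap (fun j =>
      (genIntParts (n - 1) (i - j.1)).map (fun other => j.1 :: other))
termination_by i.toNat
decreasing_by
  have h := (PySem.List.mem_pyRange_one).1 j.2
  omega

-- the inner two loops: for each part size, take that many elements from the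
-- iterator (stopping early if it is exhausted) and move on with the rest
def buildPoss (nums : List Int) (rem : List String) : List (List String) :=
  match nums with
  | [] => []
  | num :: rest => rem.take num.toNat :: buildPoss rest (rem.drop num.toNat)

def generateListPartitions (inputList : List String) (n : Int) : List (List (List String)) :=
  (genIntParts n (inputList.length : Int)).map (fun nums => buildPoss nums inputList)

-- ===== PORT B =====
-- one DP step: each partial partition either starts a new sublist with `elem`
-- or appends `elem` to its last sublist
def stepPart (partials : List (List (List String))) (elem : String) : List (List (List String)) :=
  partials.flatMap (fun p =>
    [p ++ [[elem]]] ++ (if p = [] then [] else [p.dropLast ++ [p.getLastD [] ++ [elem]]]))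

def generateListPartitions_alt (inputList : List String) (n : Int) : List (List (List String)) :=
  if n < 1 then []
  else (inputList.foldl stepPart [[]]).filter (fun p => (p.length : Int) == n)

-- ===== PRECONDITION & SPEC =====
-- For n == 1 with a nonempty list, A returns [] (its recursion bottoms out at n == 2)
-- while B returns [[inputList]], the single way to split a list into one sublist,
-- which is what the docstring ("all the ways to split a list into n lists") intends.
def D_generateListPartitions (inputList : List String) (n : Int) : Prop := n = 1 ∧ inputList ≠ []
instance (inputList : List String) (n : Int) : Decidable (D_generateListPartitions inputList n) := by unfold D_generateListPartitions; infer_instance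

def Spec_generateListPartitions (inputList : List String) (n : Int) (out : List (List (List String))) : Prop := ¬ D_generateListPartitions inputList n → out = generateListPartitions_alt inputList n
instance (inputList : List String) (n : Int) (out : List (List (List String))) : Decidable (Spec_generateListPartitions inputList n out) := by unfold Spec_generateListPartitions; infer_instance

def pvDiffWitness_generateListPartitions : List String × Int := (["a"], 1)
def pvDiffWitnessOut_generateListPartitions : (List (List (List String))) × (List (List (List String))) := ([], [[["a"]]])

-- ===== CLAIM (what is proved, stated in full; the proofs are below) =====
def Claim_unchanged_generateListPartitions : Prop := ∀ (inputList : List String) (n : Int), Dom_generateListPartitions inputList n → Spec_generateListPartitions inputList n (generateListPartitions inputList n)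
def Claim_changed_generateListPartitions : Prop := Dom_generateListPartitions (pvDiffWitness_generateListPartitions.1) (pvDiffWitness_generateListPartitions.2) ∧ D_generateListPartitions (pvDiffWitness_generateListPartitions.1) (pvDiffWitness_generateListPartitions.2) ∧ generateListPartitions (pvDiffWitness_generateListPartitions.1) (pvDiffWitness_generateListPartitions.2) = pvDiffWitnessOut_generateListPartitions.1 ∧ generateListPartitions_alt (pvDiffWitness_generateListPartitions.1) (pvDiffWitness_generateListPartitions.2) = pvDiffWitnessOut_generateListPartitions.2 ∧ pvDiffWitnessOut_generateListPartitions.1 ≠ pvDiffWitnessOut_generateListPartitions.2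
def Claim_exact_generateListPartitions : Prop := ∀ (inputList : List String) (n : Int), Dom_generateListPartitions inputList n → D_generateListPartitions inputList n → generateListPartitions inputList n ≠ generateListPartitions_alt inputList n

-- ===== LEMMAS AND PROOFS =====

-- the equation of genIntParts with the termination device removed
theorem genIntParts_eq (n i : Int) : genIntParts n i =
    if n == 2 then (PySem.List.pyRange 1 i 1).map (fun j => [j, i - j])
    else (PySem.List.pyRange 1 i 1).flatMap (fun j =>
      (genIntParts (n - 1) (i - j)).map (fun other => j :: other)) := by
  rw [genIntParts]
  split <;> simp

-- reference: all splits of zs into k nonempty consecutive sublists,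
-- in A's lexicographic order of the part sizes
def refN : Nat → List String → List (List (List String))
  | 0, _ => []
  | 1, zs => [[zs]]
  | (k+2), zs =>
    (List.range (zs.length - 1)).flatMap (fun t =>
      (refN (k+1) (zs.drop (t+1))).map (fun r => zs.take (t+1) :: r))

-- B-side reference: splits into k sublists whose first sublist extends `last`
def refSx : Nat → List String → List String → List (List (List String))
  | k, last, [] => if k = 1 then [[last]] else []
  | k, last, e :: xs => ((refSx (k-1) [e] xs).map (fun r => last :: r)) ++ refSx k (last ++ [e]) xs

theorem refSx_zero (xs : List String) : ∀ last, refSx 0 last xs = [] := by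
  induction xs with
  | nil => intro last; simp [refSx]
  | cons e xs ih => intro last; simp [refSx, ih]

theorem refSx_one (xs : List String) : ∀ last, refSx 1 last xs = [[last ++ xs]] := by
  induction xs with
  | nil => intro last; simp [refSx]
  | cons e xs ih => intro last; simp [refSx, refSx_zero, ih]

-- A's helper returns [] whenever n ≤ 1 (the recursion only bottoms out at n == 2)
theorem gIP_le_one : ∀ (m : Nat) (n i : Int), i.toNat ≤ m → n ≤ 1 → genIntParts n i = [] := by
  intro m
  induction m with
  | zero =>
    intro n i hi hn
    rw [genIntParts_eq]
    have h2 : (n == 2) = false := by simp; omega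
    have hr : PySem.List.pyRange 1 i 1 = [] := PySem.List.pyRange_one_eq_nil (by omega)
    simp [h2, hr]
  | succ m ih =>
    intro n i hi hn
    rw [genIntParts_eq]
    have h2 : (n == 2) = false := by simp; omega
    simp only [h2, Bool.false_eq_true, if_false]
    rw [List.flatMap_eq_nil_iff]
    intro j hj
    have hj' := (PySem.List.mem_pyRange_one).1 hj
    rw [ih (n - 1) (i - j) (by omega) (by omega)]
    simp

-- A's helper at i = 0: no compositions
theorem gIP_zero (n : Int) : genIntParts n 0 = [] := by
  rw [genIntParts_eq]
  have hr : PySem.List.pyRange 1 0 1 = [] := PySem.List.pyRange_one_eq_nil (by omega)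
  split <;> simp [hr]

-- A-side: for n = k+2 the composition enumeration + reconstruction is refN
theorem A_to_refN : ∀ (k : Nat) (zs : List String),
    (genIntParts ((k : Int) + 2) (zs.length : Int)).map (fun nums => buildPoss nums zs) = refN (k+2) zs := by
  intro k
  induction k with
  | zero =>
    intro zs
    rw [genIntParts_eq]
    simp only [Nat.cast_zero, zero_add, BEq.rfl, if_true]
    rw [PySem.List.pyRange_one]
    have ht : ((zs.length : Int) - 1).toNat = zs.length - 1 := by omega
    rw [ht, List.map_map, refN]
    rw [show (fun t : Nat =>
        (refN 1 (zs.drop (t+1))).map (fun r => zs.take (t+1) :: r)) = fun t : Nat =>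
        [[zs.take (t+1), zs.drop (t+1)]] from rfl]
    rw [show ((List.range (zs.length - 1)).flatMap fun t => [[zs.take (t+1), zs.drop (t+1)]]) =
        (List.range (zs.length - 1)).map fun t => [zs.take (t+1), zs.drop (t+1)] from
      (List.map_eq_flatMap ..).symm]
    rw [List.map_map]
    apply List.map_congr_left
    intro t hten
    have htl : t < zs.length - 1 := List.mem_range.1 hten
    simp only [Function.comp]
    have h1 : ((1 : Int) + t).toNat = t + 1 := by omega
    have h2 : ((zs.length : Int) - (1 + t)).toNat = zs.length - (t + 1) := by omega
    simp only [buildPoss, h1, h2]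
    have h3 : (List.drop (t+1) zs).take (zs.length - (t+1)) = List.drop (t+1) zs :=
      List.take_of_length_le (by rw [List.length_drop])
    rw [h3]
  | succ k ih =>
    intro zs
    rw [genIntParts_eq]
    have h2 : ((((k+1 : Nat) : Int) + 2) == 2) = false := by simp; omega
    simp only [h2, Bool.false_eq_true, if_false]
    rw [PySem.List.pyRange_one]
    have ht : ((zs.length : Int) - 1).toNat = zs.length - 1 := by omega
    rw [ht, List.map_flatMap, List.flatMap_map]
    rw [show refN (k+1+2) zs = (List.range (zs.length - 1)).flatMap (fun t =>
      (refN (k+2) (zs.drop (t+1))).map (fun r => zs.take (t+1) :: r)) from rfl]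
    apply List.flatMap_congr
    intro t hten
    have htl : t < zs.length - 1 := List.mem_range.1 hten
    have hn1 : (((k+1 : Nat) : Int) + 2) - 1 = ((k : Nat) : Int) + 2 := by push_cast; ring
    have h1 : ((1 : Int) + t).toNat = t + 1 := by omega
    have hlen : ((zs.length : Int) - (1 + t)) = (((zs.drop (t+1)).length : Nat) : Int) := by
      simp [List.length_drop]; omega
    rw [hn1, hlen]
    rw [List.map_map]
    have := ih (zs.drop (t+1))
    calc (genIntParts ((k:Int)+2) ((zs.drop (t+1)).length : Int)).map
          ((fun nums => buildPoss nums zs) ∘ (fun other => (1+(t:Int)) :: other))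
        = ((genIntParts ((k:Int)+2) ((zs.drop (t+1)).length : Int)).map
            (fun nums => buildPoss nums (zs.drop (t+1)))).map (fun r => zs.take (t+1) :: r) := by
          rw [List.map_map]
          apply List.map_congr_left
          intro c _
          simp only [Function.comp, buildPoss, h1]
      _ = (refN (k+2) (zs.drop (t+1))).map (fun r => zs.take (t+1) :: r) := by rw [this]

-- the DP step and its fold are additive in the list of partials
theorem step_append (ps qs : List (List (List String))) (e : String) :
    stepPart (ps ++ qs) e = stepPart ps e ++ stepPart qs e := by
  simp [stepPart]

theorem foldl_step_append : ∀ (xs : List String) (ps qs : List (List (List String))),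
    List.foldl stepPart (ps ++ qs) xs = List.foldl stepPart ps xs ++ List.foldl stepPart qs xs := by
  intro xs
  induction xs with
  | nil => intro ps qs; rfl
  | cons e xs ih => intro ps qs; simp only [List.foldl_cons, step_append, ih]

-- a partial's finished front blocks are carried through the fold unchanged
theorem foldl_step_factor : ∀ (xs : List String) (front : List (List String)) (last : List String),
    List.foldl stepPart [front ++ [last]] xs
      = (List.foldl stepPart [[last]] xs).map (fun r => front ++ r) := by
  intro xs
  induction xs with
  | nil => intro front last; rfl
  | cons e xs ih =>
    intro front last
    simp only [List.foldl_cons]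
    have hs1 : stepPart [front ++ [last]] e
        = [(front ++ [last]) ++ [[e]]] ++ [front ++ [last ++ [e]]] := by
      simp [stepPart]
    have hs2 : stepPart [[last]] e = [[last] ++ [[e]]] ++ [[last ++ [e]]] := by
      simp [stepPart]
    rw [hs1, hs2, foldl_step_append, foldl_step_append, List.map_append]
    rw [ih (front ++ [last]) [e], ih front (last ++ [e]), ih [last] [e], List.map_map]
    simp [Function.comp]

-- the fold, filtered to n parts, is refSx
theorem foldl_step_filter : ∀ (xs : List String) (last : List String) (n : Nat),
    (List.foldl stepPart [[last]] xs).filter (fun p => p.length == n) = refSx n last xs := by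
  intro xs
  induction xs with
  | nil =>
    intro last n
    by_cases h : n = 1
    · subst h; simp [refSx, List.filter]
    · have hb : ((1 : Nat) == n) = false := by simp; omega
      simp [refSx, List.filter, h, hb]
  | cons e xs ih =>
    intro last n
    simp only [List.foldl_cons]
    have hs2 : stepPart [[last]] e = [[last] ++ [[e]]] ++ [[last ++ [e]]] := by
      simp [stepPart]
    rw [hs2, foldl_step_append, List.filter_append]
    rw [foldl_step_factor xs [last] [e], List.filter_map]
    cases n with
    | zero =>
      rw [refSx_zero]
      have : ((fun p : List (List String) => p.length == 0) ∘ fun r => [last] ++ r)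
          = fun _ => false := by funext r; simp
      rw [this, List.filter_false, ih (last ++ [e]) 0, refSx_zero]
      simp
    | succ m =>
      have : ((fun p : List (List String) => p.length == m + 1) ∘ fun r => [last] ++ r)
          = fun r : List (List String) => r.length == m := by
        funext r; simp
      rw [this, ih [e] m, ih (last ++ [e]) (m+1)]
      rw [show refSx (m+1) last (e :: xs)
          = ((refSx m [e] xs).map (fun r => last :: r)) ++ refSx (m+1) (last ++ [e]) xs from rfl]
      simp

-- refSx with a fresh first block is refN
theorem refSx_to_refN : ∀ (k : Nat) (y : String) (ys : List String),
    refSx k [y] ys = refN k (y :: ys) := by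
  intro k
  induction k using Nat.strong_induction_on with
  | _ k ihk =>
    match k with
    | 0 => intro y ys; rw [refSx_zero]; rfl
    | 1 => intro y ys; rw [refSx_one]; rfl
    | (k+2) =>
      have closed : ∀ (xs : List String) (last : List String),
          refSx (k+2) last xs = (List.range xs.length).flatMap (fun t =>
            (refN (k+1) (xs.drop t)).map (fun r => (last ++ xs.take t) :: r)) := by
        intro xs
        induction xs with
        | nil => intro last; simp [refSx]
        | cons e xs ihx =>
          intro last
          rw [show refSx (k+2) last (e :: xs)
              = ((refSx (k+1) [e] xs).map (fun r => last :: r)) ++ refSx (k+2) (last ++ [e]) xs from rfl]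
          rw [ihk (k+1) (by omega) e xs, ihx (last ++ [e])]
          rw [show (e :: xs).length = xs.length + 1 from rfl, List.range_succ_eq_map]
          rw [List.flatMap_cons, List.flatMap_map]
          congr 1
          · simp
          · apply List.flatMap_congr
            intro t _
            simp [List.take_succ_cons, List.drop_succ_cons]
      intro y ys
      rw [closed ys [y]]
      rw [show refN (k+2) (y :: ys) = (List.range ((y :: ys).length - 1)).flatMap (fun t =>
        (refN (k+1) ((y :: ys).drop (t+1))).map (fun r => (y :: ys).take (t+1) :: r)) from rfl]
      simp [List.take_succ_cons, List.drop_succ_cons]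

-- the Int comparison in B's filter is the Nat comparison (0 ≤ n)
theorem filter_len_cast (l : List (List (List String))) (n : Int) (hn : 0 ≤ n) :
    l.filter (fun p => (p.length : Int) == n) = l.filter (fun p => p.length == n.toNat) := by
  apply List.filter_congr
  intro p _
  cases hb : (p.length == n.toNat) <;> simp at hb ⊢ <;> omega

-- B on x :: xs with n = k+2 computes refN (k+2) (x :: xs)
theorem B_cons_eval (x : String) (xs : List String) (k : Nat) :
    generateListPartitions_alt (x :: xs) ((k : Int) + 2) = refN (k+2) (x :: xs) := by
  unfold generateListPartitions_alt
  rw [if_neg (by omega)]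
  have hstep : stepPart [[]] x = [[[x]]] := by simp [stepPart]
  rw [List.foldl_cons, hstep]
  rw [filter_len_cast _ _ (by omega)]
  have htn : ((k : Int) + 2).toNat = k + 2 := by omega
  rw [htn, show ([[x]] : List (List String)) = [[x]] from rfl,
    foldl_step_filter xs [x] (k+2), refSx_to_refN]

-- ===== VERDICT (by name: the statement is the Claim_ definition above) =====
theorem generateListPartitions_spec : Claim_unchanged_generateListPartitions := by
  intro l n _ hND
  by_cases hn1 : n < 1
  · unfold generateListPartitions generateListPartitions_alt
    rw [gIP_le_one (l.length : Int).toNat n (l.length : Int) le_rfl (by omega)]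
    rw [if_pos hn1]
    rfl
  · by_cases hn2 : n = 1
    · have hl : l = [] := by
        by_contra hne
        exact hND ⟨hn2, hne⟩
      subst hl hn2
      unfold generateListPartitions generateListPartitions_alt
      rw [gIP_le_one 0 1 ((([] : List String).length : Int)) (by simp) le_rfl]
      simp
    · -- n ≥ 2
      obtain ⟨k, rfl⟩ : ∃ k : Nat, n = (k : Int) + 2 := ⟨(n - 2).toNat, by omega⟩
      cases l with
      | nil =>
        unfold generateListPartitions generateListPartitions_alt
        rw [show ((([] : List String).length : Int)) = 0 from rfl, gIP_zero]
        rw [if_neg (by omega)]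
        simp only [List.foldl_nil, List.map_nil]
        have h0 : (((0 : Int)) == ((k : Int) + 2)) = false := by simp; omega
        simp [List.filter, h0]
      | cons x xs =>
        rw [B_cons_eval x xs k]
        exact A_to_refN k (x :: xs)

theorem generateListPartitions_changed : Claim_changed_generateListPartitions := by
  unfold Claim_changed_generateListPartitions
  refine ⟨by decide, by decide, ?_, by decide, by decide⟩
  show generateListPartitions ["a"] 1 = []
  unfold generateListPartitions
  rw [gIP_le_one 1 1 ((["a"] : List String).length : Int) (by simp) le_rfl]
  rfl

theorem generateListPartitions_tight : Claim_exact_generateListPartitions := by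
  intro l n _ hD
  obtain ⟨hn, hl⟩ := hD
  subst hn
  cases l with
  | nil => exact absurd rfl hl
  | cons y ys =>
    unfold generateListPartitions generateListPartitions_alt
    rw [gIP_le_one ((y :: ys).length : Int).toNat 1 ((y :: ys).length : Int) le_rfl le_rfl]
    rw [if_neg (by omega)]
    have hstep : stepPart [[]] y = [[[y]]] := by simp [stepPart]
    rw [List.foldl_cons, hstep, filter_len_cast _ _ (by omega)]
    rw [show (1 : Int).toNat = 1 from rfl, foldl_step_filter ys [y] 1, refSx_one]
    simp
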